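-- pv_equiv track=rewrite | github.com/Kae1thas/lb_pv_4 | pyfiles/parallel_cg.py | auxiliary_arrays_determination
-- ===== SOURCE A (Python) =====
-- def auxiliary_arrays_determination(M, numprocs):
--     if numprocs <= 1:
--         return [M], [0]
--     ave, res = divmod(M, numprocs - 1)
--     rcounts = [0] * numprocs
--     displs = [0] * numprocs
--     for k in range(1, numprocs):
--         rcounts[k] = ave + (1 if k <= res else 0)
--         displs[k] = displs[k-1] + rcounts[k-1]
--     return rcounts, displs
-- ===== SOURCE B (Python) =====
-- def auxiliary_arrays_determination(M, numprocs):
--     if numprocs <= 1: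
--         return [M], [0]
--     ave, res = divmod(M, numprocs - 1)
--
--     def count(k):
--         return ave + (1 if k <= res else 0) if k >= 1 else 0
--
--     def offset(k):
--         # closed form for sum(count(j) for j in range(k))
--         return (k - 1) * ave + min(k - 1, res) if k >= 1 else 0
--
--     ks = range(numprocs)
--     return [count(k) for k in ks], [offset(k) for k in ks]
-- ===== Notes on version B (the rewrite author's own statement) =====
-- stated objective: alternative
-- what changed: Replaces A's sequential loop with a running recurrence (displs[k] = displs[k-1] + rcounts[k-1]) by independent closed-form per-index formulas: displs[k] = (k-1)*ave + min(k-1, res), so each entry is computed in O(1) with no sequential state.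
import Mathlib
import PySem

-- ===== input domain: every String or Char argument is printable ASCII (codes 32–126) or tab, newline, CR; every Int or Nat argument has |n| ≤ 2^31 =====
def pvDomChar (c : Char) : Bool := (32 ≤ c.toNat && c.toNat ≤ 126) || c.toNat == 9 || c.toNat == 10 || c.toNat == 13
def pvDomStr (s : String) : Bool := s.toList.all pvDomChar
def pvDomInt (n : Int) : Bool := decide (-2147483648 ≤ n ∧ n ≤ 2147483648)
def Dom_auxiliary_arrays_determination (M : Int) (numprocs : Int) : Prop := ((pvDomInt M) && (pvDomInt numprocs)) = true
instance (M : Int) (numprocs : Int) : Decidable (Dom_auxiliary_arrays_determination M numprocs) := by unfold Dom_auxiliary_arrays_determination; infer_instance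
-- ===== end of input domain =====

-- B replaces A's sequential running-sum loop with independent closed-form per-index
-- formulas (displs[k] = (k-1)*ave + min(k-1, res)); alternative decomposition, same cost.


-- ===== PORT A =====
-- loop body of A's 'for k in range(1, numprocs)'; indices k and k-1 are always in
-- range (1 ≤ k < numprocs = length), so List.set / List.getD are exact for Python's
-- rcounts[k] = … / displs[k-1] + rcounts[k-1]
def pvLoopBodyA (ave res : Int) (s : List Int × List Int) (k : Int) : List Int × List Int :=
  let rc := s.1.set k.toNat (ave + (if k ≤ res then 1 else 0))
  let ds := s.2.set k.toNat (s.2.getD (k-1).toNat 0 + rc.getD (k-1).toNat 0)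
  (rc, ds)

def auxiliary_arrays_determination (M : Int) (numprocs : Int) : List Int × List Int :=
  if numprocs ≤ 1 then ([M], [0])
  else
    let ave := PySem.Int.floordiv M (numprocs - 1)
    let res := PySem.Int.mod M (numprocs - 1)
    let rcounts := List.replicate numprocs.toNat (0 : Int)
    let displs := List.replicate numprocs.toNat (0 : Int)
    (PySem.List.pyRange 1 numprocs 1).foldl (pvLoopBodyA ave res) (rcounts, displs)

-- ===== PORT B =====
-- B's closed-form per-index functions: count(k) and offset(k)
def pvCount (ave res : Int) (k : Int) : Int :=
  if 1 ≤ k then ave + (if k ≤ res then 1 else 0) else 0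

def pvOffset (ave res : Int) (k : Int) : Int :=
  if 1 ≤ k then (k - 1) * ave + min (k - 1) res else 0

def auxiliary_arrays_determination_alt (M : Int) (numprocs : Int) : List Int × List Int :=
  if numprocs ≤ 1 then ([M], [0])
  else
    let ave := PySem.Int.floordiv M (numprocs - 1)
    let res := PySem.Int.mod M (numprocs - 1)
    let ks := PySem.List.pyRange 0 numprocs 1
    (ks.map (pvCount ave res), ks.map (pvOffset ave res))

-- ===== PRECONDITION & SPEC =====
def Spec_auxiliary_arrays_determination (M : Int) (numprocs : Int) (out : List Int × List Int) : Prop := out = auxiliary_arrays_determination_alt M numprocs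
instance (M : Int) (numprocs : Int) (out : List Int × List Int) : Decidable (Spec_auxiliary_arrays_determination M numprocs out) := by unfold Spec_auxiliary_arrays_determination; infer_instance

-- ===== CLAIM =====
def Claim_equal_auxiliary_arrays_determination : Prop := ∀ (M : Int) (numprocs : Int), Dom_auxiliary_arrays_determination M numprocs → Spec_auxiliary_arrays_determination M numprocs (auxiliary_arrays_determination M numprocs)

-- ===== LEMMAS AND PROOFS =====

-- value A writes into rcounts[k] (k ≥ 1), and rcounts[0] = 0
def rcF (ave res : Int) (k : Nat) : Int :=
  if k = 0 then 0 else ave + (if (k : Int) ≤ res then 1 else 0)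

-- value in displs[k]: prefix sum of rcF below k
def dsF (ave res : Int) (k : Nat) : Int := ((List.range k).map (rcF ave res)).sum

lemma dsF_succ (ave res : Int) (k : Nat) :
    dsF ave res (k + 1) = dsF ave res k + rcF ave res k := by
  simp [dsF, List.range_succ]

-- the A-side loop invariant: after processing k = 1 … j the first j+1 slots hold
-- rcF / dsF and the rest are still 0
lemma loopA_inv (ave res : Int) (n : Nat) (hn : 2 ≤ n) :
    ∀ j, j ≤ n - 1 →
      (PySem.List.pyRange 1 (1 + (j : Int)) 1).foldl (pvLoopBodyA ave res)
          (List.replicate n (0 : Int), List.replicate n (0 : Int))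
      = ((List.range (j + 1)).map (rcF ave res) ++ List.replicate (n - 1 - j) 0,
         (List.range (j + 1)).map (dsF ave res) ++ List.replicate (n - 1 - j) 0) := by
  intro j
  induction j with
  | zero =>
      intro _
      rw [show (1 + ((0 : Nat) : Int)) = 1 by norm_num, PySem.List.pyRange_one_eq_nil le_rfl]
      have h2 : (n - 1) + 1 = n := by omega
      have hrepn : List.replicate n (0 : Int) = 0 :: List.replicate (n - 1) 0 := by
        calc List.replicate n (0 : Int) = List.replicate ((n - 1) + 1) 0 := by rw [h2]
          _ = 0 :: List.replicate (n - 1) 0 := by rw [List.replicate_succ]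
      simp [rcF, dsF, hrepn]
  | succ j ih =>
      intro hj
      have hj' : j ≤ n - 1 := by omega
      have hrange : PySem.List.pyRange 1 (1 + ((j + 1 : Nat) : Int)) 1
          = PySem.List.pyRange 1 (1 + (j : Int)) 1 ++ [1 + (j : Int)] := by
        have := PySem.List.pyRange_one_succ_right (a := 1) (b := 1 + (j : Int)) (by omega)
        rw [show (1 + ((j + 1 : Nat) : Int)) = 1 + (j : Int) + 1 by push_cast; ring, this]
      rw [hrange, List.foldl_append, ih hj']
      simp only [List.foldl_cons, List.foldl_nil]
      have hk : (1 + (j : Int)).toNat = j + 1 := by omega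
      have hk1 : (1 + (j : Int) - 1).toNat = j := by omega
      have hrep : 1 ≤ n - 1 - j := by omega
      -- the set at index j+1 lands on the head of the replicate tail
      have hset : ∀ (f : Nat → Int) (v : Int),
          ((List.range (j + 1)).map f ++ List.replicate (n - 1 - j) 0).set (j + 1) v
          = (List.range (j + 1)).map f ++ (v :: List.replicate (n - 1 - (j + 1)) 0) := by
        intro f v
        rw [List.set_append_right _ _ (by simp),
            show n - 1 - j = 1 + (n - 1 - (j + 1)) by omega, List.replicate_add]
        simp
      have hget : ∀ (f : Nat → Int) (tl : List Int),
          ((List.range (j + 1)).map f ++ tl).getD j 0 = f j := by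
        intro f tl
        rw [List.getD_eq_getElem?_getD, List.getElem?_append_left (by simp)]
        simp
      unfold pvLoopBodyA
      simp only [hk, hk1]
      rw [hset, hset, hget, hget]
      have hv : ave + (if (1 + (j : Int)) ≤ res then 1 else 0) = rcF ave res (j + 1) := by
        simp only [rcF, if_neg (Nat.succ_ne_zero j)]
        have h : (1 + (j : Int) ≤ res) ↔ (((j + 1 : Nat) : Int) ≤ res) := by omega
        rw [if_congr h rfl rfl]
      have hd : dsF ave res j + rcF ave res j = dsF ave res (j + 1) := (dsF_succ ave res j).symm
      rw [hv, hd]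
      have hstep : ∀ (f : Nat → Int),
          List.map f (List.range (j + 1 + 1)) = List.map f (List.range (j + 1)) ++ [f (j + 1)] := by
        intro f; rw [List.range_succ]; simp
      rw [hstep, hstep]
      simp

-- B's per-index count agrees with A's table
lemma count_eq_rcF (ave res : Int) (i : Nat) :
    pvCount ave res (i : Int) = rcF ave res i := by
  unfold pvCount rcF
  rcases Nat.eq_zero_or_pos i with h | h
  · subst h; simp
  · have h1 : (1 : Int) ≤ (i : Int) := by exact_mod_cast h
    have h0 : i ≠ 0 := by omega
    simp [h1, h0]

-- closed form for the prefix sum dsF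
lemma offset_eq_dsF (ave res : Int) (hres : 0 ≤ res) (i : Nat) :
    pvOffset ave res (i : Int) = dsF ave res i := by
  induction i with
  | zero => simp [pvOffset, dsF]
  | succ i ih =>
      rw [dsF_succ, ← ih]
      simp only [pvOffset, rcF, Nat.cast_add, Nat.cast_one]
      rcases Nat.eq_zero_or_pos i with h | h
      · subst h
        simp [hres]
      · have hA : (1 : Int) ≤ (i : Int) + 1 := by omega
        have hB : (1 : Int) ≤ (i : Int) := by exact_mod_cast h
        have hC : ¬ (i = 0) := by omega
        rw [if_pos hA, if_pos hB, if_neg hC]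
        by_cases hc : ((i : Int) ≤ res)
        · rw [if_pos hc, min_eq_left (by omega), min_eq_left (by omega)]; ring
        · rw [if_neg hc, min_eq_right (by omega), min_eq_right (by omega)]; ring

-- ===== VERDICT =====
theorem auxiliary_arrays_determination_spec : Claim_equal_auxiliary_arrays_determination := by
  intro M numprocs _
  unfold Spec_auxiliary_arrays_determination auxiliary_arrays_determination auxiliary_arrays_determination_alt
  by_cases h : numprocs ≤ 1
  · simp [h]
  · simp only [if_neg h]
    have hpos : (0 : Int) < numprocs - 1 := by omega
    set ave := PySem.Int.floordiv M (numprocs - 1) with have_def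
    set res := PySem.Int.mod M (numprocs - 1) with hres_def
    have hres0 : 0 ≤ res := PySem.Int.mod_nonneg M hpos
    set n := numprocs.toNat with hn_def
    have hn : 2 ≤ n := by omega
    have hj : PySem.List.pyRange 1 numprocs 1
        = PySem.List.pyRange 1 (1 + ((n - 1 : Nat) : Int)) 1 := by
      congr 1; omega
    have := loopA_inv ave res n hn (n - 1) le_rfl
    rw [hj, this]
    have hnn : n - 1 - (n - 1) = 0 := by omega
    rw [hnn]
    simp only [List.replicate_zero, List.append_nil]
    have hsub : n - 1 + 1 = n := by omega
    rw [hsub]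
    have hks : PySem.List.pyRange 0 numprocs 1 = (List.range n).map (Nat.cast : Nat → Int) := by
      rw [show numprocs = ((n : Nat) : Int) by omega]
      exact PySem.List.pyRange_zero_natCast n
    rw [hks, List.map_map, List.map_map]
    have e1 : List.map (rcF ave res) (List.range n)
        = List.map (pvCount ave res ∘ Nat.cast) (List.range n) :=
      List.map_congr_left (fun i _ => (count_eq_rcF ave res i).symm)
    have e2 : List.map (dsF ave res) (List.range n)
        = List.map (pvOffset ave res ∘ Nat.cast) (List.range n) :=
      List.map_congr_left (fun i _ => (offset_eq_dsF ave res hres0 i).symm)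
    rw [e1, e2]
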